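-- pv_equiv track=rewrite | github.com/projeto-de-algoritmos/Grafos1_ExerciciosDeJuizOnline | exercicioC_Beecrowd/C.py | calcularDias
-- ===== SOURCE A (Python) =====
-- class UnionFind:
--     def __init__(self, size):
--         self.parent = list(range(size))
--         self.rank = [0] * size
--
--     def find(self, x):
--         if self.parent[x] != x:
--             self.parent[x] = self.find(self.parent[x])
--         return self.parent[x]
--
--     def union(self, x, y):
--         root_x = self.find(x)
--         root_y = self.find(y)
--
--         if root_x == root_y:
--             return False
--
--         if self.rank[root_x] > self.rank[root_y]:
--             self.parent[root_y] = root_x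
--         else:
--             self.parent[root_x] = root_y
--             if self.rank[root_x] == self.rank[root_y]:
--                 self.rank[root_y] += 1
--
--         return True
--
-- def calcularDias(m, n, roads):
--     total_cost = sum(road[2] for road in roads)
--     roads.sort(key=lambda road: road[2])
--     min_span_tree_cost = 0
--     union_find = UnionFind(m)
--
--     for road in roads:
--         x, y, z = road
--         if union_find.union(x, y):
--             min_span_tree_cost += z
--
--     return total_cost - min_span_tree_cost
-- ===== SOURCE B (Python) =====
-- def calcularDias(m, n, roads):
--     total_cost = sum(road[2] for road in roads)
--     comp = list(range(m))
--     forest_cost = 0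
--     for x, y, z in sorted(roads, key=lambda road: road[2]):
--         cx, cy = comp[x], comp[y]
--         if cx != cy:
--             comp = [cy if c == cx else c for c in comp]
--             forest_cost += z
--     return total_cost - forest_cost
-- ===== Notes on version B (the rewrite author's own statement) =====
-- stated objective: simpler
-- what changed: B keeps Kruskal's sorted-edge scan but replaces the entire UnionFind class (recursive find with path compression, union by rank) with a flat quick-find component-label array: an edge is kept iff its endpoints carry different labels, and a merge relabels one whole class in a single comprehension; B also leaves `roads` unmutated where A sorts it in place.
import Mathlib
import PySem

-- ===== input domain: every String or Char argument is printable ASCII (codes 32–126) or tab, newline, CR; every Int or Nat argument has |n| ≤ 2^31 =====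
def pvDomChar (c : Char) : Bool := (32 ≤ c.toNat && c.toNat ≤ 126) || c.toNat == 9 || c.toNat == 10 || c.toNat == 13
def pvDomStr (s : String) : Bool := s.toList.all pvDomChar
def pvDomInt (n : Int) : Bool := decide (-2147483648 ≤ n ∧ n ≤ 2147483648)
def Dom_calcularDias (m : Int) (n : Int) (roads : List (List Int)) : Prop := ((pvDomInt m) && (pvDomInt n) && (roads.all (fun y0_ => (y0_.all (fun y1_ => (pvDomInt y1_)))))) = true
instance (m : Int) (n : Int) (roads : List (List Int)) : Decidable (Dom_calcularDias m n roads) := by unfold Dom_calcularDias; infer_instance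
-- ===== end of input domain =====

-- B replaces A's recursive path-compressing rank union-find with a flat component-label
-- array relabelled on merge (quick-find); objective: simpler. Return-value equivalence only:
-- A sorts `roads` in place, B leaves it unmutated.

-- ===== PORT A =====
-- UnionFind.find, with fuel (Python recursion is structurally terminating on the
-- parent forest; fuel parent.length + 2 is always sufficient, proved below).
def pvFind : Nat → List Int → Int → List Int × Int
  | 0, parent, _ => (parent, 0)
  | fuel+1, parent, x =>
    let px := PySem.List.pyGetD parent x 0
    if px ≠ x then
      let rec1 := pvFind fuel parent px
      let parent1 := PySem.List.pySetD rec1.1 x rec1.2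
      (parent1, PySem.List.pyGetD parent1 x 0)
    else (parent, PySem.List.pyGetD parent x 0)

-- UnionFind.union: returns (parent, rank, merged?)
def pvUnion (parent : List Int) (rank : List Int) (x : Int) (y : Int) :
    List Int × List Int × Bool :=
  let f1 := pvFind (parent.length + 2) parent x
  let rootx := f1.2
  let f2 := pvFind (f1.1.length + 2) f1.1 y
  let rooty := f2.2
  let p := f2.1
  if rootx = rooty then (p, rank, false)
  else if PySem.List.pyGetD rank rootx 0 > PySem.List.pyGetD rank rooty 0 then
    (PySem.List.pySetD p rooty rootx, rank, true)
  else
    (PySem.List.pySetD p rootx rooty,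
     if PySem.List.pyGetD rank rootx 0 = PySem.List.pyGetD rank rooty 0 then
       PySem.List.pySetD rank rooty (PySem.List.pyGetD rank rooty 0 + 1)
     else rank,
     true)

def calcularDias (m : Int) (n : Int) (roads : List (List Int)) : Int :=
  let totalCost := roads.foldl (fun acc road => acc + PySem.List.pyGetD road 2 0) 0
  let sortedRoads := PySem.List.sorted roads (fun road => PySem.List.pyGetD road 2 0)
  let final := sortedRoads.foldl
    (fun (st : List Int × List Int × Int) road =>
      let u := pvUnion st.1 st.2.1 (PySem.List.pyGetD road 0 0) (PySem.List.pyGetD road 1 0)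
      (u.1, u.2.1, if u.2.2 then st.2.2 + PySem.List.pyGetD road 2 0 else st.2.2))
    (PySem.List.pyRange 0 m, List.replicate m.toNat 0, 0)
  totalCost - final.2.2

-- ===== PORT B =====
def calcularDias_alt (m : Int) (n : Int) (roads : List (List Int)) : Int :=
  let totalCost := roads.foldl (fun acc road => acc + PySem.List.pyGetD road 2 0) 0
  let final := (PySem.List.sorted roads (fun road => PySem.List.pyGetD road 2 0)).foldl
    (fun (st : List Int × Int) road =>
      let cx := PySem.List.pyGetD st.1 (PySem.List.pyGetD road 0 0) 0
      let cy := PySem.List.pyGetD st.1 (PySem.List.pyGetD road 1 0) 0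
      if cx ≠ cy then
        (st.1.map (fun c => if c = cx then cy else c), st.2 + PySem.List.pyGetD road 2 0)
      else st)
    (PySem.List.pyRange 0 m, 0)
  totalCost - final.2

-- ===== PRECONDITION & SPEC =====
-- Pre_: exactly the inputs on which A returns: every road has exactly 3 entries
-- (the unpacking `x, y, z = road` and `road[2]`) and both endpoints are in
-- Python's index range [-m, m) of the parent/rank lists (else IndexError).
def Pre_calcularDias (m : Int) (n : Int) (roads : List (List Int)) : Prop :=
  ∀ road ∈ roads, road.length = 3 ∧
    -m ≤ road.getD 0 0 ∧ road.getD 0 0 < m ∧ -m ≤ road.getD 1 0 ∧ road.getD 1 0 < m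
instance (m : Int) (n : Int) (roads : List (List Int)) : Decidable (Pre_calcularDias m n roads) := by
  unfold Pre_calcularDias; infer_instance

def pvWitness_calcularDias : Int × Int × List (List Int) := (3, 3, [[0, 1, 5], [1, 2, 2], [0, 2, 4]])

def Spec_calcularDias (m : Int) (n : Int) (roads : List (List Int)) (out : Int) : Prop := out = calcularDias_alt m n roads
instance (m : Int) (n : Int) (roads : List (List Int)) (out : Int) : Decidable (Spec_calcularDias m n roads out) := by unfold Spec_calcularDias; infer_instance

-- ===== CLAIM (what is proved, stated in full; the proofs are below) =====
def Claim_equal_calcularDias : Prop := ∀ (m : Int) (n : Int) (roads : List (List Int)), Dom_calcularDias m n roads → Pre_calcularDias m n roads → Spec_calcularDias m n roads (calcularDias m n roads)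

-- ===== LEMMAS AND PROOFS =====

-- Python index normalisation: index x of a list of length len, -len ≤ x < len
def pvIx (len : Nat) (x : Int) : Nat := if 0 ≤ x then x.toNat else len - (-x).toNat

theorem pvIx_lt (len : Nat) (x : Int) (h1 : -(len:Int) ≤ x) (h2 : x < (len:Int)) :
    pvIx len x < len := by
  unfold pvIx; split_ifs with h <;> omega

theorem pyIdx?_ix (len : Nat) (x : Int) (h1 : -(len:Int) ≤ x) (h2 : x < (len:Int)) :
    PySem.List.pyIdx? len x = some (pvIx len x) := by
  simp only [PySem.List.pyIdx?, pvIx]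
  split_ifs with ha hb <;> first | rfl | omega

theorem pyGetD_ix (xs : List Int) (x : Int) (d : Int)
    (h1 : -(xs.length:Int) ≤ x) (h2 : x < (xs.length:Int)) :
    PySem.List.pyGetD xs x d = xs.getD (pvIx xs.length x) d := by
  have hlt := pvIx_lt xs.length x h1 h2
  simp [PySem.List.pyGetD, PySem.List.pyGet?, pyIdx?_ix xs.length x h1 h2,
    List.getD_eq_getElem?_getD, List.getElem?_eq_getElem hlt]

theorem pySetD_ix (xs : List Int) (x : Int) (v : Int)
    (h1 : -(xs.length:Int) ≤ x) (h2 : x < (xs.length:Int)) :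
    PySem.List.pySetD xs x v = xs.set (pvIx xs.length x) v := by
  simp [PySem.List.pySetD, PySem.List.pySet?, pyIdx?_ix xs.length x h1 h2]

-- ---- the parent forest of A's UnionFind, abstractly ----
def pvPar (p : List Int) (i : Nat) : Nat := (p.getD i 0).toNat

def pvIt (p : List Int) : Nat → Nat → Nat
  | 0, i => i
  | k+1, i => pvIt p k (pvPar p i)

def pvFixP (p : List Int) (i : Nat) : Prop := pvPar p i = i

def pvBnd (p : List Int) : Prop := ∀ v ∈ p, 0 ≤ v ∧ v.toNat < p.length

def pvTerm (p : List Int) : Prop := ∀ i < p.length, ∃ n, pvFixP p (pvIt p n i)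

def pvInv (p : List Int) : Prop := pvBnd p ∧ pvTerm p

def pvRt (p : List Int) (i : Nat) : Nat := pvIt p p.length i

theorem pvIt_add (p : List Int) (a b i : Nat) :
    pvIt p (a + b) i = pvIt p b (pvIt p a i) := by
  induction a generalizing i with
  | zero => simp [pvIt]
  | succ a ih =>
    have : a + 1 + b = (a + b) + 1 := by omega
    rw [this]
    show pvIt p (a + b) (pvPar p i) = _
    rw [ih (pvPar p i)]
    rfl

theorem pvIt_fix (p : List Int) (i : Nat) (h : pvFixP p i) (k : Nat) : pvIt p k i = i := by
  induction k with
  | zero => rfl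
  | succ k ih =>
    show pvIt p k (pvPar p i) = i
    rw [h]; exact ih

theorem pvIt_stable (p : List Int) (i a b : Nat) (h : pvFixP p (pvIt p a i)) (hab : a ≤ b) :
    pvIt p b i = pvIt p a i := by
  obtain ⟨t, rfl⟩ := Nat.exists_eq_add_of_le hab
  rw [pvIt_add]
  exact pvIt_fix p _ h t

theorem pvIt_uniq (p : List Int) (i a b : Nat) (h1 : pvFixP p (pvIt p a i))
    (h2 : pvFixP p (pvIt p b i)) : pvIt p a i = pvIt p b i := by
  rcases le_total a b with h | h
  · exact (pvIt_stable p i a b h1 h).symm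
  · exact pvIt_stable p i b a h2 h

theorem pvPar_lt (p : List Int) (i : Nat) (hb : pvBnd p) (hi : i < p.length) :
    pvPar p i < p.length := by
  have hmem : p.getD i 0 ∈ p := by
    rw [List.getD_eq_getElem?_getD, List.getElem?_eq_getElem hi]
    exact List.getElem_mem hi
  exact (hb _ hmem).2

theorem pvIt_lt (p : List Int) (k i : Nat) (hb : pvBnd p) (hi : i < p.length) :
    pvIt p k i < p.length := by
  induction k generalizing i with
  | zero => exact hi
  | succ k ih => exact ih (pvPar p i) (pvPar_lt p i hb hi)

-- minimal fixpoint index is < length (the iterates before it are distinct): pigeonhole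
theorem pvFix_at_len (p : List Int) (i : Nat) (hb : pvBnd p) (hi : i < p.length)
    (h : ∃ n, pvFixP p (pvIt p n i)) : pvFixP p (pvRt p i) := by
  classical
  set d := Nat.find h with hd
  have hfix : pvFixP p (pvIt p d i) := Nat.find_spec h
  have hmin : ∀ k < d, ¬ pvFixP p (pvIt p k i) := fun k hk => Nat.find_min h hk
  have hdlt : d < p.length := by
    by_contra hge
    push_neg at hge
    -- iterates 0..d are pairwise distinct, all < length: contradiction with card
    have hinj : Set.InjOn (fun k => pvIt p k i) ↑(Finset.range (d + 1)) := by
      intro a ha b hb' hab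
      simp only [Finset.coe_range, Set.mem_Iio] at ha hb'
      have hab : pvIt p a i = pvIt p b i := hab
      by_contra hne
      rcases Nat.lt_or_ge a b with hlt | hge2
      · -- pvIt d i = pvIt (a + (d - b)) i, which is a fixpoint at index < d
        have e1 : pvIt p d i = pvIt p (d - b) (pvIt p b i) := by
          rw [← pvIt_add]; congr 1; omega
        have e2 : pvIt p d i = pvIt p (a + (d - b)) i := by
          rw [e1, ← hab, ← pvIt_add]
        have : pvFixP p (pvIt p (a + (d - b)) i) := e2 ▸ hfix
        exact hmin (a + (d - b)) (by omega) this
      · have hlt : b < a := by omega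
        have e1 : pvIt p d i = pvIt p (d - a) (pvIt p a i) := by
          rw [← pvIt_add]; congr 1; omega
        have e2 : pvIt p d i = pvIt p (b + (d - a)) i := by
          rw [e1, hab, ← pvIt_add]
        have : pvFixP p (pvIt p (b + (d - a)) i) := e2 ▸ hfix
        exact hmin (b + (d - a)) (by omega) this
    have hmaps : Set.MapsTo (fun k => pvIt p k i) ↑(Finset.range (d + 1)) ↑(Finset.range p.length) := by
      intro a _
      simp only [Finset.coe_range, Set.mem_Iio]
      exact pvIt_lt p a i hb hi
    have := Finset.card_le_card_of_injOn _ hmaps hinj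
    simp only [Finset.card_range] at this
    omega
  have := pvIt_stable p i d p.length hfix (by omega)
  unfold pvRt
  rw [this]
  exact hfix

theorem pvRt_fix (p : List Int) (i : Nat) (hinv : pvInv p) (hi : i < p.length) :
    pvFixP p (pvRt p i) :=
  pvFix_at_len p i hinv.1 hi (hinv.2 i hi)

theorem pvRt_lt (p : List Int) (i : Nat) (hb : pvBnd p) (hi : i < p.length) :
    pvRt p i < p.length := pvIt_lt p p.length i hb hi

theorem pvRt_of_fix (p : List Int) (i : Nat) (h : pvFixP p i) : pvRt p i = i :=
  pvIt_fix p i h p.length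

theorem pvRt_par (p : List Int) (i : Nat) (hinv : pvInv p) (hi : i < p.length) :
    pvRt p (pvPar p i) = pvRt p i := by
  have h1 : pvIt p (p.length + 1) i = pvRt p (pvPar p i) := by
    have : p.length + 1 = 1 + p.length := by omega
    rw [this, pvIt_add]
    rfl
  have h2 : pvIt p (p.length + 1) i = pvRt p i :=
    pvIt_stable p i p.length (p.length + 1) (pvRt_fix p i hinv hi) (by omega)
  rw [← h1, h2]


-- ---- updating one entry of the parent list ----
theorem pvPar_set (q : List Int) (a : Nat) (v : Nat) (ha : a < q.length) (j : Nat) :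
    pvPar (q.set a (v:Int)) j = if j = a then v else pvPar q j := by
  unfold pvPar
  rw [List.getD_eq_getElem?_getD, List.getD_eq_getElem?_getD, List.getElem?_set]
  by_cases hja : a = j
  · subst hja
    rw [if_pos rfl, if_pos ha, if_pos rfl]
    simp
  · rw [if_neg hja, if_neg (fun h => hja h.symm)]

theorem pvBnd_set (q : List Int) (a : Nat) (v : Nat) (hb : pvBnd q) (hv : v < q.length) :
    pvBnd (q.set a (v:Int)) := by
  intro w hw
  rw [List.length_set]
  rcases List.mem_or_eq_of_mem_set hw with h | rfl
  · exact hb w h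
  · constructor
    · exact Int.natCast_nonneg v
    · simpa using hv

-- generic reachability transfer under one link q.set a b, when b is a q'-fixpoint
-- and chains through a are redirected by tgt
theorem pvReach_set (q : List Int) (a v : Nat) (ha : a < q.length)
    (hfv : pvFixP (q.set a (v:Int)) v)
    (htgt : ∀ n, pvFixP q (pvIt q n a) → pvIt q n a = a ∨ pvIt q n a = v) :
    ∀ n j, j < q.length → pvBnd q → pvFixP q (pvIt q n j) →
      ∃ n', pvIt (q.set a (v:Int)) n' j =
          (if pvIt q n j = a then v else pvIt q n j) ∧
        pvFixP (q.set a (v:Int)) (pvIt (q.set a (v:Int)) n' j) := by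
  intro n
  induction n with
  | zero =>
    intro j hj hb hfix
    simp only [pvIt] at hfix ⊢
    by_cases hja : j = a
    · subst hja
      refine ⟨1, ?_, ?_⟩
      · have h1 : pvIt (q.set j (v:Int)) 1 j = pvPar (q.set j (v:Int)) j := rfl
        rw [h1, pvPar_set q j v ha j]
        simp
      · have h1 : pvIt (q.set j (v:Int)) 1 j = pvPar (q.set j (v:Int)) j := rfl
        rw [h1, pvPar_set q j v ha j]
        simpa using hfv
    · refine ⟨0, ?_, ?_⟩
      · simp [pvIt, hja]
      · show pvPar (q.set a (v:Int)) j = j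
        rw [pvPar_set q a v ha j, if_neg hja]
        exact hfix
  | succ n ih =>
    intro j hj hb hfix
    by_cases hfj : pvFixP q j
    · -- chain already at a fixpoint: same as the zero case
      have hz := pvIt_fix q j hfj (n+1)
      rw [hz] at hfix ⊢
      by_cases hja : j = a
      · subst hja
        refine ⟨1, ?_, ?_⟩
        · have h1 : pvIt (q.set j (v:Int)) 1 j = pvPar (q.set j (v:Int)) j := rfl
          rw [h1, pvPar_set q j v ha j]
          simp
        · have h1 : pvIt (q.set j (v:Int)) 1 j = pvPar (q.set j (v:Int)) j := rfl
          rw [h1, pvPar_set q j v ha j]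
          simpa using hfv
      · refine ⟨0, ?_, ?_⟩
        · simp [pvIt, hja]
        · show pvPar (q.set a (v:Int)) j = j
          rw [pvPar_set q a v ha j, if_neg hja]
          exact hfj
    · by_cases hja : j = a
      · -- j = a, a not a fixpoint: the chain from a ends at its root, which tgt
        -- says is v (it cannot be a, since a is not a fixpoint)
        subst hja
        have hfix' : pvFixP q (pvIt q (n+1) j) := hfix
        rcases htgt (n+1) hfix' with he | he
        · exfalso
          rw [he] at hfix'
          exact hfj hfix'
        · refine ⟨1, ?_, ?_⟩
          · have h1 : pvIt (q.set j (v:Int)) 1 j = pvPar (q.set j (v:Int)) j := rfl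
            rw [h1, pvPar_set q j v ha j, he]
            simp
          · have h1 : pvIt (q.set j (v:Int)) 1 j = pvPar (q.set j (v:Int)) j := rfl
            rw [h1, pvPar_set q j v ha j]
            simpa using hfv
      · have hstep : pvIt q (n+1) j = pvIt q n (pvPar q j) := rfl
        rw [hstep] at hfix
        obtain ⟨n', hval, hfix'⟩ := ih (pvPar q j) (pvPar_lt q j hb hj) hb hfix
        refine ⟨n' + 1, ?_, ?_⟩
        · have h1 : pvIt (q.set a (v:Int)) (n'+1) j = pvIt (q.set a (v:Int)) n' (pvPar (q.set a (v:Int)) j) := rfl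
          rw [h1, pvPar_set q a v ha j, if_neg hja, hval, hstep]
        · have h1 : pvIt (q.set a (v:Int)) (n'+1) j = pvIt (q.set a (v:Int)) n' (pvPar (q.set a (v:Int)) j) := rfl
          rw [h1, pvPar_set q a v ha j, if_neg hja]
          exact hfix'

theorem pvRt_from_reach (q' : List Int) (j : Nat) (hb' : pvBnd q') (hj : j < q'.length)
    (V n' : Nat) (hv : pvIt q' n' j = V) (hf : pvFixP q' (pvIt q' n' j)) : pvRt q' j = V := by
  have hfl : pvFixP q' (pvRt q' j) := pvFix_at_len q' j hb' hj ⟨n', hf⟩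
  have := pvIt_uniq q' j q'.length n' hfl hf
  unfold pvRt
  rw [this, hv]

-- path compression: q.set a (root a) preserves every root
theorem pvCompress_spec (q : List Int) (a : Nat) (hinv : pvInv q) (ha : a < q.length) :
    (q.set a ((pvRt q a : Nat) : Int)).length = q.length ∧
    pvInv (q.set a ((pvRt q a : Nat) : Int)) ∧
    (∀ j, j < q.length → pvRt (q.set a ((pvRt q a : Nat) : Int)) j = pvRt q j) := by
  obtain ⟨hb, ht⟩ := hinv
  set r := pvRt q a with hr
  have hrlt : r < q.length := pvRt_lt q a hb ha
  have hrfix : pvFixP q r := pvRt_fix q a ⟨hb, ht⟩ ha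
  have hfv : pvFixP (q.set a (r:Int)) r := by
    show pvPar (q.set a (r:Int)) r = r
    rw [pvPar_set q a r ha r]
    split_ifs with hra
    · rfl
    · exact hrfix
  have htgt : ∀ n, pvFixP q (pvIt q n a) → pvIt q n a = a ∨ pvIt q n a = r := by
    intro n hf
    right
    have : pvFixP q (pvRt q a) := hrfix
    exact pvIt_uniq q a n q.length hf this
  have hreach := pvReach_set q a r ha hfv htgt
  have hlen : (q.set a (r:Int)).length = q.length := List.length_set ..
  have hbnd' : pvBnd (q.set a (r:Int)) := pvBnd_set q a r hb hrlt
  refine ⟨hlen, ⟨hbnd', ?_⟩, ?_⟩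
  · intro j hj
    rw [hlen] at hj
    obtain ⟨n, hn⟩ := ht j hj
    obtain ⟨n', _, hf'⟩ := hreach n j hj hb hn
    exact ⟨n', hf'⟩
  · intro j hj
    have hfixlen : pvFixP q (pvIt q q.length j) := pvFix_at_len q j hb hj (ht j hj)
    obtain ⟨n', hval, hf'⟩ := hreach q.length j hj hb hfixlen
    have hV : (if pvIt q q.length j = a then r else pvIt q q.length j) = pvRt q j := by
      unfold pvRt
      split_ifs with he
      · -- a is then j's root, hence a fixpoint, so r = pvRt q a = a
        have hfa : pvFixP q a := he ▸ hfixlen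
        rw [he, hr, pvRt_of_fix q a hfa]
      · rfl
    have hres := pvRt_from_reach (q.set a (r:Int)) j hbnd' (by omega) _ n' hval hf'
    rw [hres, hV]


-- linking root a under root b
theorem pvLink_spec (q : List Int) (a b : Nat) (hinv : pvInv q) (ha : a < q.length)
    (hb' : b < q.length) (hfa : pvFixP q a) (hfb : pvFixP q b) (hab : a ≠ b) :
    (q.set a ((b : Nat) : Int)).length = q.length ∧
    pvInv (q.set a ((b : Nat) : Int)) ∧
    (∀ j, j < q.length →
      pvRt (q.set a ((b : Nat) : Int)) j = if pvRt q j = a then b else pvRt q j) := by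
  obtain ⟨hbnd, ht⟩ := hinv
  have hfv : pvFixP (q.set a (b:Int)) b := by
    show pvPar (q.set a (b:Int)) b = b
    rw [pvPar_set q a b ha b, if_neg (fun h => hab h.symm)]
    exact hfb
  have htgt : ∀ n, pvFixP q (pvIt q n a) → pvIt q n a = a ∨ pvIt q n a = b := by
    intro n _
    left
    exact pvIt_fix q a hfa n
  have hreach := pvReach_set q a b ha hfv htgt
  have hlen : (q.set a (b:Int)).length = q.length := List.length_set ..
  have hbnd' : pvBnd (q.set a (b:Int)) := pvBnd_set q a b hbnd hb'
  refine ⟨hlen, ⟨hbnd', ?_⟩, ?_⟩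
  · intro j hj
    rw [hlen] at hj
    obtain ⟨n, hn⟩ := ht j hj
    obtain ⟨n', _, hf'⟩ := hreach n j hj hbnd hn
    exact ⟨n', hf'⟩
  · intro j hj
    have hfixlen : pvFixP q (pvIt q q.length j) := pvFix_at_len q j hbnd hj (ht j hj)
    obtain ⟨n', hval, hf'⟩ := hreach q.length j hj hbnd hfixlen
    exact pvRt_from_reach (q.set a (b:Int)) j hbnd' (by omega) _ n' hval hf'

-- A's find: full specification
theorem pvFind_spec_nat : ∀ (fuel : Nat) (p : List Int) (i nn : Nat), pvInv p →
    i < p.length → pvFixP p (pvIt p nn i) → nn < fuel →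
    ∃ p', pvFind fuel p (i : Int) = (p', ((pvRt p i : Nat) : Int)) ∧
      p'.length = p.length ∧ pvInv p' ∧ ∀ j, j < p.length → pvRt p' j = pvRt p j := by
  intro fuel
  induction fuel with
  | zero => intro p i nn _ _ _ h; omega
  | succ f ih =>
    intro p i nn hinv hi hnn hlt
    have hmem : p.getD i 0 ∈ p := by
      rw [List.getD_eq_getElem?_getD, List.getElem?_eq_getElem hi]
      exact List.getElem_mem hi
    have hval : PySem.List.pyGetD p (i:Int) 0 = ((pvPar p i : Nat) : Int) := by
      rw [PySem.List.pyGetD_natCast]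
      unfold pvPar
      rw [Int.toNat_of_nonneg (hinv.1 _ hmem).1]
    by_cases hfix : pvFixP p i
    · refine ⟨p, ?_, rfl, hinv, fun j _ => rfl⟩
      show (if PySem.List.pyGetD p (i:Int) 0 ≠ (i:Int) then _ else (p, PySem.List.pyGetD p (i:Int) 0)) = _
      rw [hval]
      have : ((pvPar p i : Nat) : Int) = (i : Int) := by
        rw [hfix]
      rw [if_neg (by simp [this]), this, pvRt_of_fix p i hfix]
    · have hne : PySem.List.pyGetD p (i:Int) 0 ≠ (i:Int) := by
        rw [hval]
        intro h
        exact hfix (by exact_mod_cast h)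
      have hnn1 : nn ≠ 0 := by
        intro h
        subst h
        exact hfix hnn
      obtain ⟨n0, rfl⟩ : ∃ n0, nn = n0 + 1 := ⟨nn - 1, by omega⟩
      have hstep : pvIt p (n0 + 1) i = pvIt p n0 (pvPar p i) := rfl
      rw [hstep] at hnn
      have hplt : pvPar p i < p.length := pvPar_lt p i hinv.1 hi
      obtain ⟨p1, hrec, hlen1, hinv1, hpres1⟩ := ih p (pvPar p i) n0 hinv hplt hnn (by omega)
      set r := pvRt p i with hrdef
      have hrpv : pvRt p (pvPar p i) = r := pvRt_par p i hinv hi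
      have hi1 : i < p1.length := by omega
      have hr1 : pvRt p1 i = r := by rw [hpres1 i hi]
      obtain ⟨hlenC, hinvC, hpresC⟩ := pvCompress_spec p1 i hinv1 hi1
      rw [hr1] at hlenC hinvC hpresC
      refine ⟨p1.set i ((r : Nat) : Int), ?_, by omega, hinvC, ?_⟩
      · show (if PySem.List.pyGetD p (i:Int) 0 ≠ (i:Int) then
            (PySem.List.pySetD (pvFind f p (PySem.List.pyGetD p (i:Int) 0)).1 (i:Int) (pvFind f p (PySem.List.pyGetD p (i:Int) 0)).2,
             PySem.List.pyGetD (PySem.List.pySetD (pvFind f p (PySem.List.pyGetD p (i:Int) 0)).1 (i:Int) (pvFind f p (PySem.List.pyGetD p (i:Int) 0)).2) (i:Int) 0)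
          else (p, PySem.List.pyGetD p (i:Int) 0)) = _
        rw [if_pos hne, hval, hrec, hrpv]
        simp only [PySem.List.pySetD_natCast, PySem.List.pyGetD_natCast]
        have hget : (p1.set i ((r:Nat):Int)).getD i 0 = ((r:Nat):Int) := by
          rw [List.getD_eq_getElem?_getD, List.getElem?_set, if_pos rfl, if_pos hi1]
          rfl
        rw [hget]
      · intro j hj
        rw [hpresC j (by omega), hpres1 j hj]

-- A's find with a possibly negative Python index, fuel length+2
theorem pvFind_spec (p : List Int) (x : Int) (hinv : pvInv p)
    (h1 : -(p.length : Int) ≤ x) (h2 : x < (p.length : Int)) :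
    ∃ p', pvFind (p.length + 2) p x = (p', ((pvRt p (pvIx p.length x) : Nat) : Int)) ∧
      p'.length = p.length ∧ pvInv p' ∧ ∀ j, j < p.length → pvRt p' j = pvRt p j := by
  set ix := pvIx p.length x with hix
  have hixlt : ix < p.length := pvIx_lt p.length x h1 h2
  rcases (by omega : 0 ≤ x ∨ x < 0) with hx | hx
  · have hxe : ((x.toNat : Nat) : Int) = x := Int.toNat_of_nonneg hx
    have hixe : ix = x.toNat := by rw [hix]; unfold pvIx; rw [if_pos hx]
    have hfl : pvFixP p (pvIt p p.length x.toNat) :=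
      pvFix_at_len p x.toNat hinv.1 (by omega) (hinv.2 x.toNat (by omega))
    obtain ⟨p', hfind, h⟩ := pvFind_spec_nat (p.length + 2) p x.toNat p.length hinv (by omega) hfl (by omega)
    rw [hxe] at hfind
    exact ⟨p', by rw [hixe]; exact hfind, h⟩
  · have hlpos : 0 < p.length := by omega
    have hmem : p.getD ix 0 ∈ p := by
      rw [List.getD_eq_getElem?_getD, List.getElem?_eq_getElem hixlt]
      exact List.getElem_mem hixlt
    have hval : PySem.List.pyGetD p x 0 = ((pvPar p ix : Nat) : Int) := by
      rw [pyGetD_ix p x 0 h1 h2, ← hix]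
      unfold pvPar
      rw [Int.toNat_of_nonneg (hinv.1 _ hmem).1]
    have hne : PySem.List.pyGetD p x 0 ≠ x := by
      rw [hval]
      intro h
      have : (0:Int) ≤ ((pvPar p ix : Nat) : Int) := Int.natCast_nonneg _
      omega
    have hplt : pvPar p ix < p.length := pvPar_lt p ix hinv.1 hixlt
    have hfl : pvFixP p (pvIt p p.length (pvPar p ix)) :=
      pvFix_at_len p (pvPar p ix) hinv.1 hplt (hinv.2 _ hplt)
    obtain ⟨p1, hrec, hlen1, hinv1, hpres1⟩ :=
      pvFind_spec_nat (p.length + 1) p (pvPar p ix) p.length hinv hplt hfl (by omega)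
    set r := pvRt p ix with hrdef
    have hrpv : pvRt p (pvPar p ix) = r := pvRt_par p ix hinv hixlt
    have hi1 : ix < p1.length := by omega
    have hr1 : pvRt p1 ix = r := by rw [hpres1 ix hixlt]
    obtain ⟨hlenC, hinvC, hpresC⟩ := pvCompress_spec p1 ix hinv1 hi1
    rw [hr1] at hlenC hinvC hpresC
    refine ⟨p1.set ix ((r : Nat) : Int), ?_, by omega, hinvC, ?_⟩
    · show (if PySem.List.pyGetD p x 0 ≠ x then
          (PySem.List.pySetD (pvFind (p.length + 1) p (PySem.List.pyGetD p x 0)).1 x (pvFind (p.length + 1) p (PySem.List.pyGetD p x 0)).2,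
           PySem.List.pyGetD (PySem.List.pySetD (pvFind (p.length + 1) p (PySem.List.pyGetD p x 0)).1 x (pvFind (p.length + 1) p (PySem.List.pyGetD p x 0)).2) x 0)
        else (p, PySem.List.pyGetD p x 0)) = _
      rw [if_pos hne, hval, hrec, hrpv]
      simp only
      have hset : PySem.List.pySetD p1 x ((r:Nat):Int) = p1.set ix ((r:Nat):Int) := by
        rw [pySetD_ix p1 x _ (by omega) (by omega)]
        congr 1
        rw [hix]
        unfold pvIx
        rw [hlen1]
      rw [hset]
      have hget : PySem.List.pyGetD (p1.set ix ((r:Nat):Int)) x 0 = ((r:Nat):Int) := by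
        rw [pyGetD_ix _ x 0 (by rw [List.length_set]; omega) (by rw [List.length_set]; omega)]
        have : pvIx (p1.set ix ((r:Nat):Int)).length x = ix := by
          rw [List.length_set, hlen1, hix]
        rw [this, List.getD_eq_getElem?_getD, List.getElem?_set, if_pos rfl, if_pos hi1]
        rfl
      rw [hget]
    · intro j hj
      rw [hpresC j (by omega), hpres1 j hj]


theorem pvMergeEq (a b c1 c2 : Nat) (hab : a ≠ b) :
    ((if c1 = a then b else c1) = (if c2 = a then b else c2)) ↔
      (c1 = c2 ∨ ((c1 = a ∨ c1 = b) ∧ (c2 = a ∨ c2 = b))) := by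
  split_ifs <;> omega

theorem pvMergeEqInt (a b c1 c2 : Int) (hab : a ≠ b) :
    ((if c1 = a then b else c1) = (if c2 = a then b else c2)) ↔
      (c1 = c2 ∨ ((c1 = a ∨ c1 = b) ∧ (c2 = a ∨ c2 = b))) := by
  split_ifs <;> omega

-- A's union: full specification (ranks are irrelevant to the partition)
theorem pvUnion_spec (p rank : List Int) (x y : Int) (hinv : pvInv p)
    (hx1 : -(p.length:Int) ≤ x) (hx2 : x < (p.length:Int))
    (hy1 : -(p.length:Int) ≤ y) (hy2 : y < (p.length:Int)) :
    ∃ p' rank' bb, pvUnion p rank x y = (p', rank', bb) ∧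
      p'.length = p.length ∧ pvInv p' ∧
      (bb = true ↔ pvRt p (pvIx p.length x) ≠ pvRt p (pvIx p.length y)) ∧
      (pvRt p (pvIx p.length x) = pvRt p (pvIx p.length y) →
         ∀ j, j < p.length → pvRt p' j = pvRt p j) ∧
      (pvRt p (pvIx p.length x) ≠ pvRt p (pvIx p.length y) →
         ∀ u v, u < p.length → v < p.length →
           (pvRt p' u = pvRt p' v ↔ (pvRt p u = pvRt p v ∨
             ((pvRt p u = pvRt p (pvIx p.length x) ∨ pvRt p u = pvRt p (pvIx p.length y)) ∧
              (pvRt p v = pvRt p (pvIx p.length x) ∨ pvRt p v = pvRt p (pvIx p.length y)))))) := by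
  obtain ⟨p1, hf1, hlen1, hinv1, hpres1⟩ := pvFind_spec p x hinv hx1 hx2
  set rx := pvRt p (pvIx p.length x) with hrx
  set ry := pvRt p (pvIx p.length y) with hry
  have hixl : pvIx p.length x < p.length := pvIx_lt _ x hx1 hx2
  have hiyl : pvIx p.length y < p.length := pvIx_lt _ y hy1 hy2
  obtain ⟨p2, hf2, hlen2, hinv2, hpres2⟩ :=
    pvFind_spec p1 y hinv1 (by omega) (by omega)
  have hiy1 : pvIx p1.length y = pvIx p.length y := by rw [hlen1]
  have hf2' : pvFind (p1.length + 2) p1 y = (p2, ((ry : Nat) : Int)) := by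
    rw [hf2, hiy1, hpres1 _ hiyl]
  have hpres12 : ∀ j, j < p.length → pvRt p2 j = pvRt p j := by
    intro j hj
    rw [hpres2 j (by omega), hpres1 j hj]
  have hrxlt : rx < p.length := pvRt_lt p _ hinv.1 hixl
  have hrylt : ry < p.length := pvRt_lt p _ hinv.1 hiyl
  have hfixrx : pvFixP p2 rx := by
    have h1 : pvRt p2 (pvIx p.length x) = rx := hpres12 _ hixl
    have := pvRt_fix p2 (pvIx p.length x) hinv2 (by omega)
    rw [h1] at this
    exact this
  have hfixry : pvFixP p2 ry := by
    have h1 : pvRt p2 (pvIx p.length y) = ry := hpres12 _ hiyl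
    have := pvRt_fix p2 (pvIx p.length y) hinv2 (by omega)
    rw [h1] at this
    exact this
  have hUeq : pvUnion p rank x y =
      (if ((rx:Nat):Int) = ((ry:Nat):Int) then (p2, rank, false)
       else if PySem.List.pyGetD rank ((rx:Nat):Int) 0 > PySem.List.pyGetD rank ((ry:Nat):Int) 0 then
         (PySem.List.pySetD p2 ((ry:Nat):Int) ((rx:Nat):Int), rank, true)
       else (PySem.List.pySetD p2 ((rx:Nat):Int) ((ry:Nat):Int),
             if PySem.List.pyGetD rank ((rx:Nat):Int) 0 = PySem.List.pyGetD rank ((ry:Nat):Int) 0 then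
               PySem.List.pySetD rank ((ry:Nat):Int) (PySem.List.pyGetD rank ((ry:Nat):Int) 0 + 1)
             else rank, true)) := by
    simp only [pvUnion, hf1, hf2']
  by_cases heq : rx = ry
  · rw [hUeq, if_pos (by exact_mod_cast heq)]
    refine ⟨p2, rank, false, rfl, by omega, hinv2, by simp [heq], fun _ => hpres12, fun hne => absurd heq hne⟩
  · rw [hUeq, if_neg (fun h => heq (by exact_mod_cast h))]
    have hlen2' : p2.length = p.length := by omega
    by_cases hrk : PySem.List.pyGetD rank ((rx:Nat):Int) 0 > PySem.List.pyGetD rank ((ry:Nat):Int) 0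
    · -- parent[root_y] = root_x
      rw [if_pos hrk]
      have hset : PySem.List.pySetD p2 ((ry:Nat):Int) ((rx:Nat):Int) = p2.set ry ((rx:Nat):Int) :=
        PySem.List.pySetD_natCast p2 ry _
      obtain ⟨hlenL, hinvL, hrtL⟩ :=
        pvLink_spec p2 ry rx hinv2 (by omega) (by omega) hfixry hfixrx (fun h => heq h.symm)
      refine ⟨p2.set ry ((rx:Nat):Int), rank, true, by rw [hset], by omega, hinvL,
        by simp [heq], fun h => absurd h heq, fun _ u v hu hv => ?_⟩
      rw [hrtL u (by omega), hrtL v (by omega), hpres12 u hu, hpres12 v hv]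
      rw [pvMergeEq ry rx (pvRt p u) (pvRt p v) (fun h => heq h.symm)]
      tauto
    · rw [if_neg hrk]
      have hset : PySem.List.pySetD p2 ((rx:Nat):Int) ((ry:Nat):Int) = p2.set rx ((ry:Nat):Int) :=
        PySem.List.pySetD_natCast p2 rx _
      obtain ⟨hlenL, hinvL, hrtL⟩ :=
        pvLink_spec p2 rx ry hinv2 (by omega) (by omega) hfixrx hfixry heq
      refine ⟨p2.set rx ((ry:Nat):Int), _, true, by rw [hset], by omega, hinvL,
        by simp [heq], fun h => absurd h heq, fun _ u v hu hv => ?_⟩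
      rw [hrtL u (by omega), hrtL v (by omega), hpres12 u hu, hpres12 v hv]
      rw [pvMergeEq rx ry (pvRt p u) (pvRt p v) heq]


-- ---- B's flat component labels ----
theorem pvGetD_map (comp : List Int) (f : Int → Int) (u : Nat) (hu : u < comp.length) :
    (comp.map f).getD u 0 = f (comp.getD u 0) := by
  rw [List.getD_eq_getElem?_getD, List.getD_eq_getElem?_getD, List.getElem?_map,
    List.getElem?_eq_getElem hu]
  rfl

theorem pvGetD3_0 (r0 r1 r2 d : Int) : PySem.List.pyGetD [r0, r1, r2] 0 d = r0 := by
  simp [PySem.List.pyGetD, PySem.List.pyGet?, PySem.List.pyIdx?]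

theorem pvGetD3_1 (r0 r1 r2 d : Int) : PySem.List.pyGetD [r0, r1, r2] 1 d = r1 := by
  simp [PySem.List.pyGetD, PySem.List.pyGet?, PySem.List.pyIdx?]

theorem pvGetD3_2 (r0 r1 r2 d : Int) : PySem.List.pyGetD [r0, r1, r2] 2 d = r2 := by
  simp [PySem.List.pyGetD, PySem.List.pyGet?, PySem.List.pyIdx?]

-- the two folds produce the same accumulated forest cost
theorem pvFold (rds : List (List Int)) : ∀ (p rank comp : List Int) (cost : Int),
    pvInv p → comp.length = p.length →
    (∀ u v, u < p.length → v < p.length →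
      (pvRt p u = pvRt p v ↔ comp.getD u 0 = comp.getD v 0)) →
    (∀ road ∈ rds, road.length = 3 ∧
      -(p.length:Int) ≤ road.getD 0 0 ∧ road.getD 0 0 < (p.length:Int) ∧
      -(p.length:Int) ≤ road.getD 1 0 ∧ road.getD 1 0 < (p.length:Int)) →
    (rds.foldl (fun (st : List Int × List Int × Int) road =>
        let u := pvUnion st.1 st.2.1 (PySem.List.pyGetD road 0 0) (PySem.List.pyGetD road 1 0)
        (u.1, u.2.1, if u.2.2 then st.2.2 + PySem.List.pyGetD road 2 0 else st.2.2))
      (p, rank, cost)).2.2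
    = (rds.foldl (fun (st : List Int × Int) road =>
        let cx := PySem.List.pyGetD st.1 (PySem.List.pyGetD road 0 0) 0
        let cy := PySem.List.pyGetD st.1 (PySem.List.pyGetD road 1 0) 0
        if cx ≠ cy then
          (st.1.map (fun c => if c = cx then cy else c), st.2 + PySem.List.pyGetD road 2 0)
        else st) (comp, cost)).2 := by
  induction rds with
  | nil => intro p rank comp cost _ _ _ _; rfl
  | cons road rds ih =>
    intro p rank comp cost hinv hlen hcp hpre
    obtain ⟨hl3, hb0, hb0', hb1, hb1'⟩ := hpre road (List.mem_cons_self ..)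
    obtain ⟨r0, r1, r2, rfl⟩ := List.length_eq_three.mp hl3
    have hg0 : (([r0, r1, r2] : List Int)).getD 0 0 = r0 := rfl
    have hg1 : (([r0, r1, r2] : List Int)).getD 1 0 = r1 := rfl
    rw [hg0] at hb0 hb0'
    rw [hg1] at hb1 hb1'
    simp only [List.foldl_cons, pvGetD3_0, pvGetD3_1, pvGetD3_2]
    set ixx := pvIx p.length r0 with hixx
    set ixy := pvIx p.length r1 with hixy
    have hixxl : ixx < p.length := pvIx_lt _ r0 hb0 hb0'
    have hixyl : ixy < p.length := pvIx_lt _ r1 hb1 hb1'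
    obtain ⟨p', rank', bb, hU, hlen', hinv', hbb, hpresEq, hpresNe⟩ :=
      pvUnion_spec p rank r0 r1 hinv hb0 hb0' hb1 hb1'
    rw [hU]
    have hcx : PySem.List.pyGetD comp r0 0 = comp.getD ixx 0 := by
      rw [pyGetD_ix comp r0 0 (by omega) (by omega), hixx, hlen]
    have hcy : PySem.List.pyGetD comp r1 0 = comp.getD ixy 0 := by
      rw [pyGetD_ix comp r1 0 (by omega) (by omega), hixy, hlen]
    rw [hcx, hcy]
    have hiff : pvRt p ixx = pvRt p ixy ↔ comp.getD ixx 0 = comp.getD ixy 0 :=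
      hcp ixx ixy hixxl hixyl
    by_cases hroots : pvRt p ixx = pvRt p ixy
    · have hbbf : bb = false := by
        cases bb with
        | false => rfl
        | true => exact absurd hroots (hbb.mp rfl)
      have hceq : comp.getD ixx 0 = comp.getD ixy 0 := hiff.mp hroots
      rw [if_neg (not_not_intro hceq), hbbf]
      simp only [Bool.false_eq_true, if_false]
      exact ih p' rank' comp cost hinv' (by omega) (fun u v hu hv => by
          rw [hpresEq hroots u (by omega), hpresEq hroots v (by omega)]
          exact hcp u v (by omega) (by omega))
        (fun rd hrd => by
          rw [hlen']
          exact hpre rd (List.mem_cons_of_mem _ hrd))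
    · have hbbt : bb = true := hbb.mpr hroots
      have hcne : comp.getD ixx 0 ≠ comp.getD ixy 0 := fun h => hroots (hiff.mpr h)
      rw [if_pos hcne, hbbt]
      simp only [eq_self_iff_true, if_true]
      refine ih p' rank' _ (cost + r2) hinv' (by rw [List.length_map]; omega) ?_ ?_
      · intro u v hu hv
        have hu' : u < p.length := by omega
        have hv' : v < p.length := by omega
        rw [hpresNe hroots u v hu' hv']
        have hfu : (comp.map (fun c => if c = comp.getD ixx 0 then comp.getD ixy 0 else c)).getD u 0
            = (if comp.getD u 0 = comp.getD ixx 0 then comp.getD ixy 0 else comp.getD u 0) :=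
          pvGetD_map comp _ u (by omega)
        have hfv : (comp.map (fun c => if c = comp.getD ixx 0 then comp.getD ixy 0 else c)).getD v 0
            = (if comp.getD v 0 = comp.getD ixx 0 then comp.getD ixy 0 else comp.getD v 0) :=
          pvGetD_map comp _ v (by omega)
        rw [hfu, hfv, pvMergeEqInt _ _ _ _ hcne]
        rw [hcp u v hu' hv', hcp u ixx hu' hixxl, hcp u ixy hu' hixyl,
          hcp v ixx hv' hixxl, hcp v ixy hv' hixyl]
      · intro rd hrd
        rw [hlen']
        exact hpre rd (List.mem_cons_of_mem _ hrd)


-- initial state: parent = comp = list(range(m)), every vertex its own root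
theorem pvInit_len (m : Int) : (PySem.List.pyRange 0 m).length = m.toNat := by
  rw [PySem.List.length_pyRange_one]
  norm_num

theorem pvInit_fix (m : Int) (i : Nat) (hi : i < (PySem.List.pyRange 0 m).length) :
    pvFixP (PySem.List.pyRange 0 m) i := by
  show pvPar (PySem.List.pyRange 0 m) i = i
  unfold pvPar
  rw [List.getD_eq_getElem?_getD, List.getElem?_eq_getElem hi,
    PySem.List.getElem_pyRange_one 0 m i hi]
  simp

theorem pvInit_inv (m : Int) : pvInv (PySem.List.pyRange 0 m) := by
  constructor
  · intro v hv
    have := PySem.List.mem_pyRange_one.mp hv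
    rw [pvInit_len]
    omega
  · intro i hi
    exact ⟨0, pvInit_fix m i hi⟩

theorem pvInit_rt (m : Int) (i : Nat) (hi : i < (PySem.List.pyRange 0 m).length) :
    pvRt (PySem.List.pyRange 0 m) i = i :=
  pvRt_of_fix _ i (pvInit_fix m i hi)

theorem pvInit_cp (m : Int) (u v : Nat)
    (hu : u < (PySem.List.pyRange 0 m).length) (hv : v < (PySem.List.pyRange 0 m).length) :
    (pvRt (PySem.List.pyRange 0 m) u = pvRt (PySem.List.pyRange 0 m) v ↔
      (PySem.List.pyRange 0 m).getD u 0 = (PySem.List.pyRange 0 m).getD v 0) := by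
  rw [pvInit_rt m u hu, pvInit_rt m v hv,
    List.getD_eq_getElem?_getD, List.getD_eq_getElem?_getD,
    List.getElem?_eq_getElem hu, List.getElem?_eq_getElem hv,
    PySem.List.getElem_pyRange_one 0 m u hu, PySem.List.getElem_pyRange_one 0 m v hv]
  simp

-- ===== VERDICT (by name: the statement is the Claim_ definition above) =====
theorem calcularDias_spec : Claim_equal_calcularDias := by
  intro m n roads _ hpre
  unfold Spec_calcularDias
  by_cases hm : 0 < m
  · simp only [calcularDias, calcularDias_alt]
    congr 1
    have hlen0 : (PySem.List.pyRange 0 m).length = m.toNat := pvInit_len m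
    have hcast : ((PySem.List.pyRange 0 m).length : Int) = m := by
      rw [hlen0]
      omega
    refine pvFold (PySem.List.sorted roads fun road => PySem.List.pyGetD road 2 0)
      (PySem.List.pyRange 0 m) (List.replicate m.toNat 0) (PySem.List.pyRange 0 m) 0
      (pvInit_inv m) rfl (pvInit_cp m) ?_
    intro road hrd
    have hmem : road ∈ roads := (PySem.List.mem_sorted roads _ false road).mp hrd
    have := hpre road hmem
    rw [hcast]
    exact this
  · have hroads : roads = [] := by
      cases roads with
      | nil => rfl
      | cons r rs =>
        have := hpre r (List.mem_cons_self ..)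
        omega
    subst hroads
    rfl
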